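-- pv_equiv track=rewrite | github.com/denisousa/search_algorithms_mc3_problem | code/generate_metrics.py | get_k_hits
-- ===== SOURCE A (Python) =====
-- def get_k_hits(recommended_items, relevant_items):
--     recommended_and_relevant = []
--
--     hit = []
--
--     for index, item in enumerate(recommended_items):
--         if len(recommended_and_relevant) == len(relevant_items):
--             break
--
--         check, relevant_hit = check_clone_is_correct(relevant_items, item)
--         if check:
--             recommended_and_relevant.append(item)
--             hit.append(index + 1)
--
--     return f"{hit}"
--
-- def check_clone_is_correct(oracle_clones_list, siamese_clone):
--     siamese_clone = {
--         "file2": siamese_clone[0],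
--         "start2": siamese_clone[1],
--         "end2": siamese_clone[2],
--     }
--
--     for oracle_clone in oracle_clones_list:
--         oracle_clone = {
--             "file2": oracle_clone[0],
--             "start2": oracle_clone[1],
--             "end2": oracle_clone[2],
--         }
--
--         file2_condition = oracle_clone["file2"] == siamese_clone["file2"]
--         start2_condition = oracle_clone["start2"] >= siamese_clone["start2"]
--         end2_condition = oracle_clone["end2"] <= siamese_clone["end2"]
--
--         if file2_condition and start2_condition and end2_condition:
--             return True, list(oracle_clone.values())
--
--         start2_condition = oracle_clone["start2"] <= siamese_clone["start2"]
--         end2_condition = oracle_clone["end2"] >= siamese_clone["end2"]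
--
--         if file2_condition and start2_condition and end2_condition:
--             return True, list(oracle_clone.values())
--
--     return False, list(oracle_clone.values())
-- ===== SOURCE B (Python) =====
-- from bisect import bisect_left, bisect_right
--
--
-- def _table(pairs):
--     pairs = sorted(pairs, key=lambda p: p[0])
--     starts = [p[0] for p in pairs]
--     pre = []           # pre[i] = max end among pairs[0..i]
--     best = None
--     for _, e in pairs:
--         best = e if best is None or e > best else best
--         pre.append(best)
--     suf = []           # suf[i] = min end among pairs[i..]
--     best = None
--     for _, e in reversed(pairs):
--         best = e if best is None or e < best else best
--         suf.append(best)
--     suf.reverse()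
--     return starts, pre, suf
--
--
-- def get_k_hits(recommended_items, relevant_items):
--     index = {}
--     for f, s, e in relevant_items:
--         index.setdefault(f, []).append((s, e))
--     tables = {f: _table(ps) for f, ps in index.items()}
--
--     hit = []
--     cap = len(relevant_items)
--     for i, (f, s, e) in enumerate(recommended_items):
--         if len(hit) == cap:
--             break
--         t = tables.get(f)
--         if t is None:
--             continue
--         starts, pre, suf = t
--         kr = bisect_right(starts, s)
--         if kr > 0 and pre[kr - 1] >= e:       # some oracle with start <= s has end >= e
--             hit.append(i + 1)
--             continue
--         kl = bisect_left(starts, s)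
--         if kl < len(starts) and suf[kl] <= e:  # some oracle with start >= s has end <= e
--             hit.append(i + 1)
--     return f"{hit}"
-- ===== Notes on version B (the rewrite author's own statement) =====
-- stated objective: faster
-- what changed: Replaces A's per-item linear scan of the oracle list with a precomputed per-file index: oracle intervals grouped by file, sorted by start, with prefix-max and suffix-min of the end coordinate, so each containment test becomes two binary searches.
import Mathlib
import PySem

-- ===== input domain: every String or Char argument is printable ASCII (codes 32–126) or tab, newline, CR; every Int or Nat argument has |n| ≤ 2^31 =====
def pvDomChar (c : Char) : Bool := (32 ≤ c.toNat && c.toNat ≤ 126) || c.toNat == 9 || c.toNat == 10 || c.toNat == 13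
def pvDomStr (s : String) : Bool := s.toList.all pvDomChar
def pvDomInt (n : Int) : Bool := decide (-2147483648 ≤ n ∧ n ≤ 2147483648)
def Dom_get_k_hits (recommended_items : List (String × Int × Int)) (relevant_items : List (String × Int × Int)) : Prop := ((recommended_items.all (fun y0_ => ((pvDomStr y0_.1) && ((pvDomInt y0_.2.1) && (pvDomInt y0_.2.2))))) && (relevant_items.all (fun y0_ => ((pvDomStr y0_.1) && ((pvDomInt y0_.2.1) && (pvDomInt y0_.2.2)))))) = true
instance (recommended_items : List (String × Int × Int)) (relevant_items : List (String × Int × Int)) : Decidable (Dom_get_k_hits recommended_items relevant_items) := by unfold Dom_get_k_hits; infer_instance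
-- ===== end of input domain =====

-- B replaces A's per-item linear scan of the whole oracle list by a per-file index (intervals
-- sorted by start, prefix-max / suffix-min of ends, two binary searches per query).

-- f"{hit}" for a Python list of ints (identical final formatting step of both Pythons)
def pyReprIntList (xs : List Int) : String :=
  "[" ++ String.intercalate ", " (xs.map PySem.Int.toStr) ++ "]"

-- ===== PORT A =====
-- check_clone_is_correct: the Python also returns a second value (list(oracle_clone.values()))
-- that the caller binds and never uses; it is omitted here.  The [] case (where the Python
-- would raise NameError) is unreachable from get_k_hits, which breaks before calling with [].
def check_clone_is_correct (oracle_clones_list : List (String × Int × Int)) (siamese_clone : String × Int × Int) : Bool :=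
  match oracle_clones_list with
  | [] => false
  | oc :: rest =>
    if oc.1 == siamese_clone.1 && decide (oc.2.1 ≥ siamese_clone.2.1) && decide (oc.2.2 ≤ siamese_clone.2.2) then
      true
    else if oc.1 == siamese_clone.1 && decide (oc.2.1 ≤ siamese_clone.2.1) && decide (oc.2.2 ≥ siamese_clone.2.2) then
      true
    else
      check_clone_is_correct rest siamese_clone

-- the for-loop of get_k_hits, state = (recommended_and_relevant, hit)
def getKHitsLoopA (relevant_items : List (String × Int × Int)) :
    List (Int × (String × Int × Int)) → List (String × Int × Int) → List Int → List Int
  | [], _, hit => hit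
  | (index, item) :: rest, rar, hit =>
    if rar.length == relevant_items.length then hit
    else if check_clone_is_correct relevant_items item then
      getKHitsLoopA relevant_items rest (rar ++ [item]) (hit ++ [index + 1])
    else
      getKHitsLoopA relevant_items rest rar hit

def get_k_hits (recommended_items : List (String × Int × Int)) (relevant_items : List (String × Int × Int)) : String :=
  pyReprIntList (getKHitsLoopA relevant_items (PySem.List.enumerate recommended_items) [] [])

-- ===== PORT B =====
-- _table(pairs): sort by start, starts list, prefix running max of ends, suffix running min of ends
def tableB (pairs : List (Int × Int)) : List Int × List Int × List Int :=
  let ps := PySem.List.sorted pairs (fun p => p.1) false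
  let starts := ps.map (fun p => p.1)
  let pre := (ps.foldl (fun (acc : List Int × Option Int) p =>
      let best : Int := match acc.2 with
        | none => p.2
        | some b => if p.2 > b then p.2 else b
      (acc.1 ++ [best], some best)) ([], none)).1
  let suf := ((ps.reverse.foldl (fun (acc : List Int × Option Int) p =>
      let best : Int := match acc.2 with
        | none => p.2
        | some b => if p.2 < b then p.2 else b
      (acc.1 ++ [best], some best)) ([], none)).1).reverse
  (starts, pre, suf)

-- index.setdefault(f, []).append((s, e))  ≡  index[f] = index.get(f, []) + [(s, e)]  = Dict.modify
def indexB (relevant_items : List (String × Int × Int)) : PySem.Dict String (List (Int × Int)) :=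
  relevant_items.foldl (fun d p => d.modify p.1 [] (fun l => l ++ [p.2])) PySem.Dict.empty

-- {f: _table(ps) for f, ps in index.items()} — the keys of a dict are unique, so Dict.mk of
-- the mapped items list is exactly this comprehension
def tablesB (relevant_items : List (String × Int × Int)) : PySem.Dict String (List Int × List Int × List Int) :=
  PySem.Dict.mk ((indexB relevant_items).items.map (fun p => (p.1, tableB p.2)))

-- the main loop of B; pre[kr-1] / suf[kl] are indexed with List.getD, exact here because the
-- guards kr > 0 / kl < len(starts) keep the index in range (len pre = len suf = len starts)
def getKHitsLoopB (tables : PySem.Dict String (List Int × List Int × List Int)) (cap : Nat) :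
    List (Int × (String × Int × Int)) → List Int → List Int
  | [], hit => hit
  | (i, item) :: rest, hit =>
    if hit.length == cap then hit
    else
      match tables.get? item.1 with
      | none => getKHitsLoopB tables cap rest hit
      | some (starts, pre, suf) =>
        if PySem.List.bisectRight starts item.2.1 > 0 &&
            decide (pre.getD (PySem.List.bisectRight starts item.2.1 - 1) 0 ≥ item.2.2) then
          getKHitsLoopB tables cap rest (hit ++ [i + 1])
        else if PySem.List.bisectLeft starts item.2.1 < starts.length &&
            decide (suf.getD (PySem.List.bisectLeft starts item.2.1) 0 ≤ item.2.2) then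
          getKHitsLoopB tables cap rest (hit ++ [i + 1])
        else
          getKHitsLoopB tables cap rest hit

def get_k_hits_alt (recommended_items : List (String × Int × Int)) (relevant_items : List (String × Int × Int)) : String :=
  pyReprIntList (getKHitsLoopB (tablesB relevant_items) relevant_items.length
    (PySem.List.enumerate recommended_items) [])

-- ===== PRECONDITION & SPEC =====
def Spec_get_k_hits (recommended_items : List (String × Int × Int)) (relevant_items : List (String × Int × Int)) (out : String) : Prop := out = get_k_hits_alt recommended_items relevant_items
instance (recommended_items : List (String × Int × Int)) (relevant_items : List (String × Int × Int)) (out : String) : Decidable (Spec_get_k_hits recommended_items relevant_items out) := by unfold Spec_get_k_hits; infer_instance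

-- ===== CLAIM (what is proved, stated in full; the proofs are below) =====
def Claim_equal_get_k_hits : Prop := ∀ (recommended_items : List (String × Int × Int)) (relevant_items : List (String × Int × Int)), Dom_get_k_hits recommended_items relevant_items → Spec_get_k_hits recommended_items relevant_items (get_k_hits recommended_items relevant_items)

-- ===== LEMMAS AND PROOFS =====
theorem mem_take_bisectRight (sp : List (Int × Int)) (s : Int)
    (hs : sp.Pairwise (fun a b => a.1 ≤ b.1)) (p : Int × Int) :
    p ∈ sp.take (PySem.List.bisectRight (sp.map (·.1)) s) ↔ p ∈ sp ∧ p.1 ≤ s := by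
  have hps : (sp.map (·.1)).Pairwise (fun a b => a ≤ b) := List.pairwise_map.mpr hs
  obtain ⟨hle, hlt, hgt⟩ := PySem.List.bisectRight_spec (sp.map (·.1)) s hps
  simp only [List.length_map] at hle hlt hgt
  constructor
  · intro hp
    obtain ⟨j, hj, hget⟩ := List.mem_take_iff_getElem.mp hp
    have hjn : j < sp.length := lt_of_lt_of_le (lt_min_iff.mp hj).1 hle |>.trans_le (le_refl _) |>.trans_le (le_refl _)
    refine ⟨hget ▸ List.getElem_mem _, ?_⟩
    have := hlt j (by simpa using hjn) (lt_min_iff.mp hj).1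
    simpa [hget] using this
  · rintro ⟨hp, hple⟩
    obtain ⟨j, hjn, hget⟩ := List.getElem_of_mem hp
    refine List.mem_take_iff_getElem.mpr ⟨j, ?_, hget⟩
    have hjlt : j < PySem.List.bisectRight (sp.map (·.1)) s := by
      by_contra hge
      have := hgt j (by simpa using hjn) (le_of_not_gt hge)
      simp only [List.getElem_map, hget] at this
      omega
    exact lt_min_iff.mpr ⟨hjlt, hjn⟩

theorem mem_drop_bisectLeft (sp : List (Int × Int)) (s : Int)
    (hs : sp.Pairwise (fun a b => a.1 ≤ b.1)) (p : Int × Int) :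
    p ∈ sp.drop (PySem.List.bisectLeft (sp.map (·.1)) s) ↔ p ∈ sp ∧ s ≤ p.1 := by
  have hps : (sp.map (·.1)).Pairwise (fun a b => a ≤ b) := List.pairwise_map.mpr hs
  obtain ⟨hle, hlt, hgt⟩ := PySem.List.bisectLeft_spec (sp.map (·.1)) s hps
  simp only [List.length_map] at hle hlt hgt
  set kl := PySem.List.bisectLeft (sp.map (·.1)) s with hkl
  constructor
  · intro hp
    obtain ⟨j, hj, hget⟩ := List.mem_drop_iff_getElem.mp hp
    refine ⟨hget ▸ List.getElem_mem _, ?_⟩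
    have := hgt (kl + j) (by omega) (by omega)
    simpa [hget] using this
  · rintro ⟨hp, hple⟩
    obtain ⟨j, hjn, hget⟩ := List.getElem_of_mem hp
    have hjge : kl ≤ j := by
      by_contra hlt'
      have := hlt j (by simpa using hjn) (by omega)
      simp only [List.getElem_map, hget] at this
      omega
    refine List.mem_drop_iff_getElem.mpr ⟨j - kl, by omega, ?_⟩
    simp only [show kl + (j - kl) = j by omega]
    exact hget
def omax (b : Option Int) (e : Int) : Int := match b with | none => e | some x => if e > x then e else x
def omin (b : Option Int) (e : Int) : Int := match b with | none => e | some x => if e < x then e else x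

def scanMax (b : Option Int) : List (Int × Int) → List Int
  | [] => []
  | p :: t => omax b p.2 :: scanMax (some (omax b p.2)) t

def scanMin (b : Option Int) : List (Int × Int) → List Int
  | [] => []
  | p :: t => omin b p.2 :: scanMin (some (omin b p.2)) t

theorem foldMax_fst (ps : List (Int × Int)) : ∀ (acc : List Int) (b : Option Int),
    (ps.foldl (fun (acc : List Int × Option Int) p =>
      let best : Int := match acc.2 with
        | none => p.2
        | some b => if p.2 > b then p.2 else b
      (acc.1 ++ [best], some best)) (acc, b)).1 = acc ++ scanMax b ps := by
  induction ps with
  | nil => simp [scanMax]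
  | cons p t ih => intro acc b; simp [scanMax, ih, omax]

theorem foldMin_fst (ps : List (Int × Int)) : ∀ (acc : List Int) (b : Option Int),
    (ps.foldl (fun (acc : List Int × Option Int) p =>
      let best : Int := match acc.2 with
        | none => p.2
        | some b => if p.2 < b then p.2 else b
      (acc.1 ++ [best], some best)) (acc, b)).1 = acc ++ scanMin b ps := by
  induction ps with
  | nil => simp [scanMin]
  | cons p t ih => intro acc b; simp [scanMin, ih, omin]

theorem length_scanMin (b : Option Int) (ps : List (Int × Int)) : (scanMin b ps).length = ps.length := by
  induction ps generalizing b with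
  | nil => rfl
  | cons p t ih => simp [scanMin, ih]

theorem omax_ge (b : Option Int) (x e : Int) :
    (omax b x ≥ e) ↔ (x ≥ e ∨ ∃ m, b = some m ∧ m ≥ e) := by
  cases b with
  | none => simp [omax]
  | some y =>
    simp only [omax, ge_iff_le, Option.some.injEq, exists_eq_left']
    split_ifs <;> omega

theorem omin_le (b : Option Int) (x e : Int) :
    (omin b x ≤ e) ↔ (x ≤ e ∨ ∃ m, b = some m ∧ m ≤ e) := by
  cases b with
  | none => simp [omin]
  | some y =>
    simp only [omin, Option.some.injEq, exists_eq_left']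
    split_ifs <;> omega

theorem scanMax_getD (e : Int) (ps : List (Int × Int)) : ∀ (b : Option Int) (k : Nat), k < ps.length →
    ((scanMax b ps).getD k 0 ≥ e ↔
      ((∃ p ∈ ps.take (k+1), p.2 ≥ e) ∨ ∃ m, b = some m ∧ m ≥ e)) := by
  induction ps with
  | nil => intro b k hk; simp at hk
  | cons p t ih =>
    intro b k hk
    cases k with
    | zero => simp [scanMax, omax_ge]
    | succ k =>
      have hk' : k < t.length := by simpa using hk
      simp only [scanMax, List.getD_cons_succ, ih (some (omax b p.2)) k hk', List.take_succ_cons]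
      simp only [List.mem_cons]
      constructor
      · rintro (⟨q, hq, hqe⟩ | ⟨m, hm, hme⟩)
        · exact Or.inl ⟨q, Or.inr hq, hqe⟩
        · have hm' : omax b p.2 = m := by simpa using hm
          have hme' : omax b p.2 ≥ e := by rw [hm']; exact hme
          rcases (omax_ge b p.2 e).mp hme' with h | ⟨m', hm', hme''⟩
          · exact Or.inl ⟨p, Or.inl rfl, h⟩
          · exact Or.inr ⟨m', hm', hme''⟩
      · rintro (⟨q, hq | hq, hqe⟩ | ⟨m, hm, hme⟩)
        · subst hq; exact Or.inr ⟨omax b q.2, rfl, (omax_ge b q.2 e).mpr (Or.inl hqe)⟩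
        · exact Or.inl ⟨q, hq, hqe⟩
        · exact Or.inr ⟨omax b p.2, rfl, (omax_ge b p.2 e).mpr (Or.inr ⟨m, hm, hme⟩)⟩

theorem scanMin_getD (e : Int) (ps : List (Int × Int)) : ∀ (b : Option Int) (k : Nat), k < ps.length →
    ((scanMin b ps).getD k 0 ≤ e ↔
      ((∃ p ∈ ps.take (k+1), p.2 ≤ e) ∨ ∃ m, b = some m ∧ m ≤ e)) := by
  induction ps with
  | nil => intro b k hk; simp at hk
  | cons p t ih =>
    intro b k hk
    cases k with
    | zero => simp [scanMin, omin_le]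
    | succ k =>
      have hk' : k < t.length := by simpa using hk
      simp only [scanMin, List.getD_cons_succ, ih (some (omin b p.2)) k hk', List.take_succ_cons]
      simp only [List.mem_cons]
      constructor
      · rintro (⟨q, hq, hqe⟩ | ⟨m, hm, hme⟩)
        · exact Or.inl ⟨q, Or.inr hq, hqe⟩
        · have hm' : omin b p.2 = m := by simpa using hm
          have hme' : omin b p.2 ≤ e := by rw [hm']; exact hme
          rcases (omin_le b p.2 e).mp hme' with h | ⟨m', hm', hme''⟩
          · exact Or.inl ⟨p, Or.inl rfl, h⟩
          · exact Or.inr ⟨m', hm', hme''⟩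
      · rintro (⟨q, hq | hq, hqe⟩ | ⟨m, hm, hme⟩)
        · subst hq; exact Or.inr ⟨omin b q.2, rfl, (omin_le b q.2 e).mpr (Or.inl hqe)⟩
        · exact Or.inl ⟨q, hq, hqe⟩
        · exact Or.inr ⟨omin b p.2, rfl, (omin_le b p.2 e).mpr (Or.inr ⟨m, hm, hme⟩)⟩
theorem hitB_table (pairs : List (Int × Int)) (s e : Int) :
    ((PySem.List.bisectRight (tableB pairs).1 s > 0 &&
        decide ((tableB pairs).2.1.getD (PySem.List.bisectRight (tableB pairs).1 s - 1) 0 ≥ e)) ||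
     (PySem.List.bisectLeft (tableB pairs).1 s < (tableB pairs).1.length &&
        decide ((tableB pairs).2.2.getD (PySem.List.bisectLeft (tableB pairs).1 s) 0 ≤ e))) =
    pairs.any (fun p => (decide (p.1 ≥ s) && decide (p.2 ≤ e)) || (decide (p.1 ≤ s) && decide (p.2 ≥ e))) := by
  have hstarts : (tableB pairs).1 = (PySem.List.sorted pairs (fun p => p.1) false).map (fun p => p.1) := rfl
  have hpre : (tableB pairs).2.1 = scanMax none (PySem.List.sorted pairs (fun p => p.1) false) := by
    simp [tableB, foldMax_fst]
  have hsuf : (tableB pairs).2.2 =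
      (scanMin none (PySem.List.sorted pairs (fun p => p.1) false).reverse).reverse := by
    have h := foldMin_fst (PySem.List.sorted pairs (fun p => p.1) false).reverse [] none
    rw [List.nil_append] at h
    exact congrArg List.reverse h
  set sp := PySem.List.sorted pairs (fun p => p.1) false with hsp
  have hperm : sp.Perm pairs := PySem.List.sorted_perm pairs (fun p => p.1) false
  have hsorted : sp.Pairwise (fun a b => a.1 ≤ b.1) := PySem.List.sorted_pairwise pairs (fun p => p.1)
  have hps : (sp.map (fun p => p.1)).Pairwise (fun a b => a ≤ b) := List.pairwise_map.mpr hsorted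
  set kr := PySem.List.bisectRight (sp.map (fun p => p.1)) s with hkr
  set kl := PySem.List.bisectLeft (sp.map (fun p => p.1)) s with hkl
  have hkrle : kr ≤ sp.length := by
    have := (PySem.List.bisectRight_spec (sp.map (fun p => p.1)) s hps).1
    simpa using this
  have hklle : kl ≤ sp.length := by
    have := (PySem.List.bisectLeft_spec (sp.map (fun p => p.1)) s hps).1
    simpa using this
  rw [Bool.eq_iff_iff]
  rw [hstarts, hpre, hsuf]
  simp only [← hkr, ← hkl, Bool.or_eq_true, Bool.and_eq_true, decide_eq_true_eq,
    List.any_eq_true, List.length_map]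
  -- R: the take side
  have hR : (0 < kr ∧ (scanMax none sp).getD (kr - 1) 0 ≥ e) ↔ ∃ p ∈ sp, p.1 ≤ s ∧ e ≤ p.2 := by
    constructor
    · rintro ⟨hkr0, hge⟩
      rcases (scanMax_getD e sp none (kr - 1) (by omega)).mp hge with ⟨p, hp, hpe⟩ | ⟨m, hm, _⟩
      · rw [show kr - 1 + 1 = kr by omega] at hp
        rcases (mem_take_bisectRight sp s hsorted p).mp hp with ⟨hmem, hle⟩
        exact ⟨p, hmem, hle, hpe⟩
      · simp at hm
    · rintro ⟨p, hp, hps', hpe⟩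
      have hmem := (mem_take_bisectRight sp s hsorted p).mpr ⟨hp, hps'⟩
      have hkr0 : 0 < kr := by
        rcases Nat.eq_zero_or_pos kr with h | h
        · rw [← hkr] at hmem; rw [h] at hmem; simp at hmem
        · exact h
      refine ⟨hkr0, (scanMax_getD e sp none (kr - 1) (by omega)).mpr ?_⟩
      rw [show kr - 1 + 1 = kr by omega]
      exact Or.inl ⟨p, hmem, hpe⟩
  -- L: the drop side
  have hrevlen : (scanMin none sp.reverse).length = sp.length := by simp [length_scanMin]
  have hL : (kl < sp.length ∧ ((scanMin none sp.reverse).reverse).getD kl 0 ≤ e) ↔ ∃ p ∈ sp, s ≤ p.1 ∧ p.2 ≤ e := by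
    constructor
    · rintro ⟨hkln, hle⟩
      have hgetrev : ((scanMin none sp.reverse).reverse).getD kl 0 = (scanMin none sp.reverse).getD (sp.length - 1 - kl) 0 := by
        rw [List.getD_eq_getElem?_getD, List.getD_eq_getElem?_getD,
          List.getElem?_eq_getElem (by simp [hrevlen]; omega),
          List.getElem?_eq_getElem (by omega)]
        simp [List.getElem_reverse, hrevlen]
      rw [hgetrev] at hle
      rcases (scanMin_getD e sp.reverse none (sp.length - 1 - kl) (by simp; omega)).mp hle with ⟨p, hp, hpe⟩ | ⟨m, hm, _⟩
      · rw [show sp.length - 1 - kl + 1 = sp.length - kl by omega] at hp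
        rw [List.take_reverse] at hp
        rw [show sp.length - (sp.length - kl) = kl by omega] at hp
        rw [List.mem_reverse] at hp
        rcases (mem_drop_bisectLeft sp s hsorted p).mp hp with ⟨hmem, hge⟩
        exact ⟨p, hmem, hge, hpe⟩
      · simp at hm
    · rintro ⟨p, hp, hps', hpe⟩
      have hmem := (mem_drop_bisectLeft sp s hsorted p).mpr ⟨hp, hps'⟩
      have hkln : kl < sp.length := by
        by_contra hge
        rw [← hkl, List.drop_eq_nil_of_le (by omega)] at hmem
        simp at hmem
      refine ⟨hkln, ?_⟩
      have hgetrev : ((scanMin none sp.reverse).reverse).getD kl 0 = (scanMin none sp.reverse).getD (sp.length - 1 - kl) 0 := by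
        rw [List.getD_eq_getElem?_getD, List.getD_eq_getElem?_getD,
          List.getElem?_eq_getElem (by simp [hrevlen]; omega),
          List.getElem?_eq_getElem (by omega)]
        simp [List.getElem_reverse, hrevlen]
      rw [hgetrev]
      refine (scanMin_getD e sp.reverse none (sp.length - 1 - kl) (by simp; omega)).mpr (Or.inl ⟨p, ?_, hpe⟩)
      rw [show sp.length - 1 - kl + 1 = sp.length - kl by omega, List.take_reverse,
        show sp.length - (sp.length - kl) = kl by omega, List.mem_reverse]
      exact hmem
  constructor
  · rintro (h | h)
    · rcases hR.mp ⟨h.1, h.2⟩ with ⟨p, hp, h1, h2⟩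
      exact ⟨p, hperm.mem_iff.mp hp, Or.inr ⟨h1, h2⟩⟩
    · rcases hL.mp ⟨h.1, h.2⟩ with ⟨p, hp, h1, h2⟩
      exact ⟨p, hperm.mem_iff.mp hp, Or.inl ⟨h1, h2⟩⟩
  · rintro ⟨p, hp, ⟨h1, h2⟩ | ⟨h1, h2⟩⟩
    · exact Or.inr (hL.mpr ⟨p, hperm.mem_iff.mpr hp, h1, h2⟩)
    · exact Or.inl (hR.mpr ⟨p, hperm.mem_iff.mpr hp, h1, h2⟩)
theorem check_clone_eq_any (relevant : List (String × Int × Int)) (sc : String × Int × Int) :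
    check_clone_is_correct relevant sc =
      relevant.any (fun oc => oc.1 == sc.1 &&
        ((decide (oc.2.1 ≥ sc.2.1) && decide (oc.2.2 ≤ sc.2.2)) ||
         (decide (oc.2.1 ≤ sc.2.1) && decide (oc.2.2 ≥ sc.2.2)))) := by
  induction relevant with
  | nil => rfl
  | cons oc rest ih =>
    simp only [check_clone_is_correct, List.any_cons, ih]
    cases hA : (oc.1 == sc.1) <;>
      cases hx1 : decide (oc.2.1 ≥ sc.2.1) <;>
      cases hx2 : decide (oc.2.2 ≤ sc.2.2) <;>
      cases hy1 : decide (oc.2.1 ≤ sc.2.1) <;>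
      cases hy2 : decide (oc.2.2 ≥ sc.2.2) <;>
      simp_all

theorem get?_mk_map {ν ν' : Type} (g : ν → ν') (l : List (String × ν)) (k : String) :
    (PySem.Dict.mk (l.map (fun p => (p.1, g p.2)))).get? k = Option.map g ((PySem.Dict.mk l).get? k) := by
  induction l with
  | nil => rfl
  | cons p t ih =>
    obtain ⟨pk, pv⟩ := p
    simp only [List.map_cons, PySem.Dict.get?_mk_cons, ih]
    split <;> rfl

theorem getD_indexB (relevant : List (String × Int × Int)) (f : String) :
    (indexB relevant).getD f [] = (relevant.filter (fun p => p.1 == f)).map (fun p => p.2) := by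
  have h := PySem.Dict.getD_foldl_modify_append relevant (PySem.Dict.empty) f
  simpa [indexB] using h

def hitB (tables : PySem.Dict String (List Int × List Int × List Int)) (item : String × Int × Int) : Bool :=
  match tables.get? item.1 with
  | none => false
  | some (starts, pre, suf) =>
    (PySem.List.bisectRight starts item.2.1 > 0 &&
      decide (pre.getD (PySem.List.bisectRight starts item.2.1 - 1) 0 ≥ item.2.2)) ||
    (PySem.List.bisectLeft starts item.2.1 < starts.length &&
      decide (suf.getD (PySem.List.bisectLeft starts item.2.1) 0 ≤ item.2.2))

theorem hitB_eq_check (relevant : List (String × Int × Int)) (item : String × Int × Int) :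
    hitB (tablesB relevant) item = check_clone_is_correct relevant item := by
  rw [check_clone_eq_any]
  have hget : (tablesB relevant).get? item.1 = Option.map tableB ((indexB relevant).get? item.1) := by
    have h := get?_mk_map tableB (indexB relevant).items item.1
    exact h
  have hany : relevant.any (fun oc => oc.1 == item.1 &&
        ((decide (oc.2.1 ≥ item.2.1) && decide (oc.2.2 ≤ item.2.2)) ||
         (decide (oc.2.1 ≤ item.2.1) && decide (oc.2.2 ≥ item.2.2)))) =
      ((relevant.filter (fun p => p.1 == item.1)).map (fun p => p.2)).any
        (fun p => (decide (p.1 ≥ item.2.1) && decide (p.2 ≤ item.2.2)) ||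
                  (decide (p.1 ≤ item.2.1) && decide (p.2 ≥ item.2.2))) := by
    rw [List.any_map, List.any_filter]
    rfl
  rw [hany]
  unfold hitB
  cases hidx : (indexB relevant).get? item.1 with
  | none =>
    rw [hget, hidx]
    simp only [Option.map_none]
    have hfilter : (relevant.filter (fun p => p.1 == item.1)) = [] := by
      have hcont : (indexB relevant).contains item.1 = false := by
        rw [PySem.Dict.contains_eq_isSome_get?, hidx]; rfl
      have hkeys : (indexB relevant).keys = PySem.Set.ofList (relevant.map (fun p => p.1)) := by
        have h := PySem.Dict.keys_foldl_modify_key relevant (fun p => p.1) ([] : List (Int × Int))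
          (fun _ x l => l ++ [x.2]) PySem.Dict.empty
        simpa [indexB, PySem.Set.update_nil_left] using h
      have hnotmem : item.1 ∉ relevant.map (fun p => p.1) := by
        intro hmem
        rw [PySem.Dict.contains_eq_decide_mem_keys, hkeys] at hcont
        rw [decide_eq_false_iff_not] at hcont
        exact hcont ((PySem.Set.mem_ofList _ _).mpr hmem)
      rw [List.filter_eq_nil_iff]
      intro p hp
      simp only [beq_iff_eq]
      intro hpe
      exact hnotmem (hpe ▸ List.mem_map_of_mem hp)
    rw [hfilter]
    rfl
  | some ps =>
    rw [hget, hidx]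
    simp only [Option.map_some]
    have hps : ps = (relevant.filter (fun p => p.1 == item.1)).map (fun p => p.2) := by
      have h := getD_indexB relevant item.1
      rw [PySem.Dict.getD, hidx] at h
      simpa using h
    rw [← hps]
    exact hitB_table ps item.2.1 item.2.2

-- loop equivalence, invariant: |recommended_and_relevant| = |hit|
theorem loop_eq (relevant : List (String × Int × Int)) :
    ∀ (items : List (Int × (String × Int × Int))) (rar : List (String × Int × Int)) (hit : List Int),
      rar.length = hit.length →
      getKHitsLoopA relevant items rar hit = getKHitsLoopB (tablesB relevant) relevant.length items hit := by
  intro items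
  induction items with
  | nil => intro rar hit _; rfl
  | cons it rest ih =>
    rintro rar hit hlen
    obtain ⟨i, item⟩ := it
    simp only [getKHitsLoopA, getKHitsLoopB, hlen]
    by_cases hcap : hit.length = relevant.length
    · simp [hcap]
    · have hbeq : (hit.length == relevant.length) = false := by simpa using hcap
      rw [hbeq]
      simp only [Bool.false_eq_true, if_false]
      have hc := hitB_eq_check relevant item
      unfold hitB at hc
      cases hget : (tablesB relevant).get? item.1 with
      | none =>
        rw [hget] at hc
        rw [← hc]
        exact ih rar hit hlen
      | some t =>
        obtain ⟨starts, pre, suf⟩ := t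
        rw [hget] at hc
        rw [← hc]
        by_cases h1 : (PySem.List.bisectRight starts item.2.1 > 0 &&
            decide (pre.getD (PySem.List.bisectRight starts item.2.1 - 1) 0 ≥ item.2.2)) = true
        · simp only [h1, Bool.true_or, if_true]
          exact ih (rar ++ [item]) (hit ++ [i + 1]) (by simp [hlen])
        · simp only [Bool.not_eq_true] at h1
          simp only [h1, Bool.false_or, Bool.false_eq_true, if_false]
          by_cases h2 : (PySem.List.bisectLeft starts item.2.1 < starts.length &&
              decide (suf.getD (PySem.List.bisectLeft starts item.2.1) 0 ≤ item.2.2)) = true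
          · simp only [h2, if_true]
            exact ih (rar ++ [item]) (hit ++ [i + 1]) (by simp [hlen])
          · simp only [Bool.not_eq_true] at h2
            simp only [h2, Bool.false_eq_true, if_false]
            exact ih rar hit hlen

-- ===== VERDICT (by name: the statement is the Claim_ definition above) =====
theorem get_k_hits_spec : Claim_equal_get_k_hits := by
  intro recommended relevant _
  unfold Spec_get_k_hits get_k_hits get_k_hits_alt
  rw [loop_eq relevant _ [] [] rfl]
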